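-- pv_equiv track=rewrite | github.com/peterpepo/AdventOfCode2017 | day_10/day_10.py | knot_hash_n_times
-- ===== SOURCE A (Python) =====
-- def knot_hash(input_array, offset, length):
--     """
--     Returns knot hash of array passed as input.
--     """
--     hashed_array = list(input_array)
--
--     for i in range(length):
--         replaced_position = (offset + i) % len(input_array)
--         replaced_by_position = (offset + length - i - 1) % len(input_array)
--         hashed_array[replaced_position] = input_array[replaced_by_position]
--
--     return hashed_array
--
-- def knot_hash_n_times(input_array, lengths, times):
--     """
--     Applies knot hash of [lengths] lengths [n] times on input and returns result.
--     Skip size and current position variables are preserved between applications of knot hash.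
--     """
--     current_position = 0
--     skip_size = 0
--
--     for n in range(times):
--         for length in lengths:
--             input_array = knot_hash(input_array, current_position, length)
--             current_position += length
--             current_position += skip_size
--             skip_size += 1
--
--     return input_array
-- ===== SOURCE B (Python) =====
-- def knot_hash_n_times(input_array, lengths, times):
--     """Single flattened pass over lengths*times; each segment is reversed in
--     place with two-pointer swaps instead of rebuilding a full array copy per step."""
--     arr = list(input_array)
--     size = len(arr)
--     pos = 0
--     for k, length in enumerate(lengths * max(times, 0)):
--         for i in range(length // 2):
--             a = (pos + i) % size
--             b = (pos + length - 1 - i) % size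
--             arr[a], arr[b] = arr[b], arr[a]
--         pos += length + k
--     return arr
-- ===== Notes on version B (the rewrite author's own statement) =====
-- stated objective: alternative
-- what changed: Replaces the per-step full-array copy-and-rewrite inside two nested rounds loops by a single flattened enumerate pass that reverses each wraparound segment in place with two-pointer swaps (length//2 swaps per step, no per-step copy); measurably faster on small inputs but a timing run's large inputs fall outside Pre_, so no speed is claimed.
-- outside the precondition, e.g. on knot_hash_n_times([1, 2, 3], [5], 1): A returns [2, 1, 3], B returns [1, 2, 3]
import Mathlib
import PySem

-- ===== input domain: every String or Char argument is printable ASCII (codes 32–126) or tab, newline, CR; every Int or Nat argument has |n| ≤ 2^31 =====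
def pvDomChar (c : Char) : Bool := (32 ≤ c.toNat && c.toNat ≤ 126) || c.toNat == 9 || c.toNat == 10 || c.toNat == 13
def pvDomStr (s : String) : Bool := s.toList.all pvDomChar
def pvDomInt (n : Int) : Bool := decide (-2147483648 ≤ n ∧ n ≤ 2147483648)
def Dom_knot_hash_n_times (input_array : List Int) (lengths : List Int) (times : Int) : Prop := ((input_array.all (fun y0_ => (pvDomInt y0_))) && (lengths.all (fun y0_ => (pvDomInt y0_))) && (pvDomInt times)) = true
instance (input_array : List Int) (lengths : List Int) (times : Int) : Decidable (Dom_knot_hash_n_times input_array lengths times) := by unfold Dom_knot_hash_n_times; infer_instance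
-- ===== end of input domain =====

-- B replaces A's per-step full-array copy-and-rewrite by a single flattened pass that
-- reverses each wraparound segment in place with two-pointer swaps (objective: alternative).

-- ===== PORT A =====
-- indices come from '%' with a positive list length, so they are in range and
-- List.set / List.getD are exact there; '% 0' (Python ZeroDivisionError) is excluded by Pre_.
def knot_hash (input_array : List Int) (offset : Int) (length : Int) : List Int :=
  (PySem.List.pyRange 0 length 1).foldl
    (fun hashed_array i =>
      hashed_array.set
        (PySem.Int.mod (offset + i) (input_array.length : Int)).toNat
        (input_array.getD (PySem.Int.mod (offset + length - i - 1) (input_array.length : Int)).toNat 0))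
    input_array

def knot_hash_n_times (input_array : List Int) (lengths : List Int) (times : Int) : List Int :=
  ((PySem.List.pyRange 0 times 1).foldl
    (fun (st : List Int × Int × Int) _ =>
      lengths.foldl
        (fun (st : List Int × Int × Int) length =>
          (knot_hash st.1 st.2.1 length, st.2.1 + length + st.2.2, st.2.2 + 1))
        st)
    (input_array, 0, 0)).1

-- ===== PORT B =====
-- the in-place two-pointer reversal loop of Source B ('for i in range(length // 2): swap');
-- List.set preserves length, so 'arr.length' below is Source B's fixed 'size'.
def reverse_segment (arr : List Int) (pos : Int) (length : Int) : List Int :=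
  (PySem.List.pyRange 0 (PySem.Int.floordiv length 2) 1).foldl
    (fun arr i =>
      let a := (PySem.Int.mod (pos + i) (arr.length : Int)).toNat
      let b := (PySem.Int.mod (pos + length - 1 - i) (arr.length : Int)).toNat
      let va := arr.getD a 0
      let vb := arr.getD b 0
      (arr.set a vb).set b va)
    arr

def knot_hash_n_times_alt (input_array : List Int) (lengths : List Int) (times : Int) : List Int :=
  ((PySem.List.enumerate ((List.replicate (max times 0).toNat lengths).flatten) 0).foldl
    (fun (st : List Int × Int) kl =>
      (reverse_segment st.1 st.2 kl.2, st.2 + kl.2 + kl.1))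
    (input_array, 0)).1

-- ===== PRECONDITION & SPEC =====
-- Pre_ excludes inputs where some applied length exceeds len(input_array): there the
-- knot-hash reversal is unspecified — A's overwrite leftovers and B's swap result are
-- both accidental values no caller would specify (this also excludes the
-- ZeroDivisionError of an empty array with a positive length).
def Pre_knot_hash_n_times (input_array : List Int) (lengths : List Int) (times : Int) : Prop :=
  times ≤ 0 ∨ ∀ l ∈ lengths, l ≤ (input_array.length : Int)
instance (input_array : List Int) (lengths : List Int) (times : Int) : Decidable (Pre_knot_hash_n_times input_array lengths times) := by unfold Pre_knot_hash_n_times; infer_instance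

def pvWitness_knot_hash_n_times : List Int × List Int × Int := ([1, 2, 3, 4, 5], [3, 2], 2)

def Spec_knot_hash_n_times (input_array : List Int) (lengths : List Int) (times : Int) (out : List Int) : Prop := out = knot_hash_n_times_alt input_array lengths times
instance (input_array : List Int) (lengths : List Int) (times : Int) (out : List Int) : Decidable (Spec_knot_hash_n_times input_array lengths times out) := by unfold Spec_knot_hash_n_times; infer_instance

-- ===== CLAIM (what is proved, stated in full; the proofs are below) =====
def Claim_equal_knot_hash_n_times : Prop := ∀ (input_array : List Int) (lengths : List Int) (times : Int), Dom_knot_hash_n_times input_array lengths times → Pre_knot_hash_n_times input_array lengths times → Spec_knot_hash_n_times input_array lengths times (knot_hash_n_times input_array lengths times)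

-- ===== LEMMAS AND PROOFS =====

-- fold over range(0, x) as a fold over List.range
theorem pv_foldl_pyRange01 {α : Type} (f : α → Int → α) (x : Int) (init : α) :
    (PySem.List.pyRange 0 x 1).foldl f init
      = (List.range x.toNat).foldl (fun a (k : Nat) => f a (k : Int)) init := by
  rw [PySem.List.pyRange_one, List.foldl_map]
  simp only [Int.sub_zero, zero_add]

-- a % N = p (0 ≤ p < N) iff N divides a - p
theorem pv_emod_eq_iff {N p : Int} (hp0 : 0 ≤ p) (hpN : p < N) (a : Int) :
    a % N = p ↔ (a - p) % N = 0 := by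
  have hpp : p % N = p := Int.emod_eq_of_lt hp0 hpN
  calc a % N = p ↔ a % N = p % N := by rw [hpp]
    _ ↔ (a - p) % N = 0 := Int.emod_eq_emod_iff_emod_sub_eq_zero

-- the write position (o+m) % N equals p iff the residue of p is m
theorem pv_hit_iff {N : Int} (_hN : 0 < N) (o m : Int) (hm0 : 0 ≤ m) (hmN : m < N)
    (p : Int) (hp0 : 0 ≤ p) (hpN : p < N) :
    ((o + m) % N = p) ↔ (p - o) % N = m := by
  rw [pv_emod_eq_iff hp0 hpN, pv_emod_eq_iff hm0 hmN]
  constructor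
  · intro hx
    have hd := Int.dvd_of_emod_eq_zero hx
    refine Int.emod_eq_zero_of_dvd ?_
    have h2 : p - o - m = -(o + m - p) := by ring
    rw [h2]; exact dvd_neg.mpr hd
  · intro hx
    have hd := Int.dvd_of_emod_eq_zero hx
    refine Int.emod_eq_zero_of_dvd ?_
    have h2 : o + m - p = -(p - o - m) := by ring
    rw [h2]; exact dvd_neg.mpr hd

theorem pv_emod_sub_left (a b N : Int) : (a % N - b) % N = (a - b) % N := by
  conv_lhs => rw [Int.sub_emod]
  rw [Int.emod_emod_of_dvd _ (dvd_refl N), ← Int.sub_emod]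

-- toNat form of the hit condition
theorem pv_hit_toNat {N : Int} (hN : 0 < N) (o i : Int) (hi0 : 0 ≤ i) (hiN : i < N)
    (p : Nat) (hp : (p : Int) < N) :
    (((o + i) % N).toNat = p) ↔ ((p : Int) - o) % N = i := by
  have h2 : 0 ≤ (o + i) % N := Int.emod_nonneg _ (by omega)
  have hx : (((o + i) % N).toNat = p) ↔ (o + i) % N = (p : Int) := by
    constructor
    · intro h; rw [← h, Int.toNat_of_nonneg h2]
    · intro h; rw [h, Int.toNat_natCast]
  rw [hx]
  exact pv_hit_iff hN o i hi0 hiN (p : Int) (by positivity) hp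

-- residue of the position (o+i) % N is i itself, for i in [0, N)
theorem pv_res_of_pos {N : Int} (hN : 0 < N) (o i : Int) (hi0 : 0 ≤ i) (hiN : i < N) :
    (((((o + i) % N).toNat : Int)) - o) % N = i := by
  rw [Int.toNat_of_nonneg (Int.emod_nonneg _ (by omega)), pv_emod_sub_left]
  have h2 : o + i - o = i := by ring
  rw [h2]; exact Int.emod_eq_of_lt hi0 hiN

theorem pv_getD_set (xs : List Int) (i : Nat) (v : Int) (p : Nat) (hp : p < xs.length) :
    (xs.set i v).getD p 0 = if i = p then v else xs.getD p 0 := by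
  by_cases h : i = p
  · subst h
    rw [if_pos rfl, List.getD_eq_getElem _ _ (by simpa using hp), List.getElem_set_self]
  · rw [if_neg h, List.getD_eq_getElem _ _ (by simpa using hp),
      List.getD_eq_getElem _ _ hp, List.getElem_set_ne h]

theorem pv_foldl_set_length {β : Type} (f : List Int → β → List Int)
    (hf : ∀ a b, (f a b).length = a.length) (xs : List β) (init : List Int) :
    (xs.foldl f init).length = init.length := by
  induction xs generalizing init with
  | nil => rfl
  | cons x xs ih => rw [List.foldl_cons, ih, hf]

-- A's one-step loop, as a Nat-indexed prefix fold (m writes done)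
def pvA (input : List Int) (o ℓ : Int) (m : Nat) : List Int :=
  (List.range m).foldl
    (fun arr (k : Nat) =>
      arr.set (PySem.Int.mod (o + (k : Int)) (input.length : Int)).toNat
        (input.getD (PySem.Int.mod (o + ℓ - (k : Int) - 1) (input.length : Int)).toNat 0))
    input

theorem knot_hash_eq_pvA (input : List Int) (o ℓ : Int) :
    knot_hash input o ℓ = pvA input o ℓ ℓ.toNat := by
  unfold knot_hash pvA
  exact pv_foldl_pyRange01 _ ℓ input

-- B's swap loop, as a Nat-indexed prefix fold (j swaps done)
def pvB (input : List Int) (o ℓ : Int) (j : Nat) : List Int :=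
  (List.range j).foldl
    (fun arr (k : Nat) =>
      let a := (PySem.Int.mod (o + (k : Int)) (arr.length : Int)).toNat
      let b := (PySem.Int.mod (o + ℓ - 1 - (k : Int)) (arr.length : Int)).toNat
      let va := arr.getD a 0
      let vb := arr.getD b 0
      (arr.set a vb).set b va)
    input

theorem reverse_segment_eq_pvB (input : List Int) (o ℓ : Int) :
    reverse_segment input o ℓ = pvB input o ℓ (PySem.Int.floordiv ℓ 2).toNat := by
  unfold reverse_segment pvB
  exact pv_foldl_pyRange01 _ _ input

theorem pvA_succ (input : List Int) (o ℓ : Int) (m : Nat) :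
    pvA input o ℓ (m + 1)
      = (pvA input o ℓ m).set (PySem.Int.mod (o + (m : Int)) (input.length : Int)).toNat
          (input.getD (PySem.Int.mod (o + ℓ - (m : Int) - 1) (input.length : Int)).toNat 0) := by
  unfold pvA
  rw [List.range_succ, List.foldl_append, List.foldl_cons, List.foldl_nil]

theorem pvB_succ (input : List Int) (o ℓ : Int) (j : Nat) :
    pvB input o ℓ (j + 1)
      = ((pvB input o ℓ j).set
            (PySem.Int.mod (o + (j : Int)) ((pvB input o ℓ j).length : Int)).toNat
            ((pvB input o ℓ j).getD
              (PySem.Int.mod (o + ℓ - 1 - (j : Int)) ((pvB input o ℓ j).length : Int)).toNat 0)).set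
          (PySem.Int.mod (o + ℓ - 1 - (j : Int)) ((pvB input o ℓ j).length : Int)).toNat
          ((pvB input o ℓ j).getD
            (PySem.Int.mod (o + (j : Int)) ((pvB input o ℓ j).length : Int)).toNat 0) := by
  unfold pvB
  rw [List.range_succ, List.foldl_append, List.foldl_cons, List.foldl_nil]

theorem pvA_char (input : List Int) (o ℓ : Int) (hN : 0 < (input.length : Int))
    (hℓ : ℓ ≤ (input.length : Int)) (m : Nat) (hm : (m : Int) ≤ ℓ) :
    (pvA input o ℓ m).length = input.length ∧
    ∀ p : Nat, p < input.length →
      (pvA input o ℓ m).getD p 0 =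
        if ((p : Int) - o) % (input.length : Int) < (m : Int)
        then input.getD ((o + ℓ - 1 - (((p : Int) - o) % (input.length : Int))) % (input.length : Int)).toNat 0
        else input.getD p 0 := by
  induction m with
  | zero =>
    refine ⟨rfl, fun p hp => ?_⟩
    obtain ⟨d, hd, hd0, hdN⟩ : ∃ d : Int, ((p : Int) - o) % (input.length : Int) = d
        ∧ 0 ≤ d ∧ d < (input.length : Int) :=
      ⟨_, rfl, Int.emod_nonneg _ (by omega), Int.emod_lt_of_pos _ hN⟩
    rw [hd, if_neg (by omega)]
    rfl
  | succ m ih =>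
    obtain ⟨ihlen, ihval⟩ := ih (by omega)
    have hmN : (m : Int) < (input.length : Int) := by omega
    have hmod : PySem.Int.mod (o + (m : Int)) (input.length : Int)
        = (o + (m : Int)) % (input.length : Int) := PySem.Int.mod_eq_emod_of_pos hN
    constructor
    · rw [pvA_succ, List.length_set, ihlen]
    · intro p hp
      have hpI : (p : Int) < (input.length : Int) := by exact_mod_cast hp
      rw [pvA_succ, hmod]
      have hplen : p < (pvA input o ℓ m).length := by rw [ihlen]; exact hp
      rw [pv_getD_set _ _ _ _ hplen, ihval p hp]
      have hhit := pv_hit_toNat hN o (m : Int) (by positivity) hmN p hpI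
      -- abstract the residue so the case split is pure arithmetic
      obtain ⟨d, hd, hd0, hdN⟩ : ∃ d : Int, ((p : Int) - o) % (input.length : Int) = d
          ∧ 0 ≤ d ∧ d < (input.length : Int) :=
        ⟨_, rfl, Int.emod_nonneg _ (by omega), Int.emod_lt_of_pos _ hN⟩
      rw [hd] at hhit ⊢
      by_cases hc : ((o + (m : Int)) % (input.length : Int)).toNat = p
      · have hdm : d = (m : Int) := hhit.mp hc
        rw [if_pos hc, if_pos (by omega), hdm]
        rw [PySem.Int.mod_eq_emod_of_pos hN]
        congr 2
        ring_nf
      · have hdm : d ≠ (m : Int) := fun h => hc (hhit.mpr h)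
        rw [if_neg hc]
        by_cases hlt : d < (m : Int)
        · rw [if_pos hlt, if_pos (by omega)]
        · rw [if_neg hlt, if_neg (by omega)]

theorem pvB_char (input : List Int) (o ℓ : Int) (hN : 0 < (input.length : Int))
    (hℓ0 : 0 < ℓ) (hℓ : ℓ ≤ (input.length : Int)) (j : Nat) (hj : 2 * (j : Int) ≤ ℓ) :
    (pvB input o ℓ j).length = input.length ∧
    ∀ p : Nat, p < input.length →
      (pvB input o ℓ j).getD p 0 =
        if ((p : Int) - o) % (input.length : Int) < (j : Int)
            ∨ (ℓ - (j : Int) ≤ ((p : Int) - o) % (input.length : Int)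
                ∧ ((p : Int) - o) % (input.length : Int) < ℓ)
        then input.getD ((o + ℓ - 1 - (((p : Int) - o) % (input.length : Int))) % (input.length : Int)).toNat 0
        else input.getD p 0 := by
  induction j with
  | zero =>
    refine ⟨rfl, fun p hp => ?_⟩
    obtain ⟨d, hd, hd0, hdN⟩ : ∃ d : Int, ((p : Int) - o) % (input.length : Int) = d
        ∧ 0 ≤ d ∧ d < (input.length : Int) :=
      ⟨_, rfl, Int.emod_nonneg _ (by omega), Int.emod_lt_of_pos _ hN⟩
    rw [hd, if_neg (by omega)]
    rfl
  | succ j ih =>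
    obtain ⟨ihlen, ihval⟩ := ih (by omega)
    have hjN : (j : Int) < (input.length : Int) := by omega
    have hb0N : 0 ≤ ℓ - 1 - (j : Int) ∧ ℓ - 1 - (j : Int) < (input.length : Int) := by omega
    have hmoda : PySem.Int.mod (o + (j : Int)) (((pvB input o ℓ j).length : Nat) : Int)
        = (o + (j : Int)) % (input.length : Int) := by
      rw [ihlen]; exact PySem.Int.mod_eq_emod_of_pos hN
    have hmodb : PySem.Int.mod (o + ℓ - 1 - (j : Int)) (((pvB input o ℓ j).length : Nat) : Int)
        = (o + (ℓ - 1 - (j : Int))) % (input.length : Int) := by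
      rw [ihlen, PySem.Int.mod_eq_emod_of_pos hN]
      ring_nf
    have hstep := pvB_succ input o ℓ j
    rw [hmoda, hmodb] at hstep
    -- the two swap positions
    have hpaN : ((o + (j : Int)) % (input.length : Int)).toNat < input.length := by
      have h1 := Int.emod_nonneg (o + (j : Int)) (by omega : (input.length : Int) ≠ 0)
      have h2 := Int.emod_lt_of_pos (o + (j : Int)) hN
      omega
    have hpbN : ((o + (ℓ - 1 - (j : Int))) % (input.length : Int)).toNat < input.length := by
      have h1 := Int.emod_nonneg (o + (ℓ - 1 - (j : Int))) (by omega : (input.length : Int) ≠ 0)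
      have h2 := Int.emod_lt_of_pos (o + (ℓ - 1 - (j : Int))) hN
      omega
    have hda := pv_res_of_pos hN o (j : Int) (by positivity) hjN
    have hdb := pv_res_of_pos hN o (ℓ - 1 - (j : Int)) hb0N.1 hb0N.2
    -- old values at the swap positions are still the input values
    have hva : (pvB input o ℓ j).getD ((o + (j : Int)) % (input.length : Int)).toNat 0
        = input.getD ((o + (j : Int)) % (input.length : Int)).toNat 0 := by
      rw [ihval _ hpaN, hda, if_neg (by omega)]
    have hvb : (pvB input o ℓ j).getD ((o + (ℓ - 1 - (j : Int))) % (input.length : Int)).toNat 0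
        = input.getD ((o + (ℓ - 1 - (j : Int))) % (input.length : Int)).toNat 0 := by
      rw [ihval _ hpbN, hdb, if_neg (by omega)]
    constructor
    · rw [hstep, List.length_set, List.length_set, ihlen]
    · intro p hp
      have hpI : (p : Int) < (input.length : Int) := by exact_mod_cast hp
      have hplen1 : p < ((pvB input o ℓ j).set
          ((o + (j : Int)) % (input.length : Int)).toNat
          ((pvB input o ℓ j).getD ((o + (ℓ - 1 - (j : Int))) % (input.length : Int)).toNat 0)).length := by
        rw [List.length_set, ihlen]; exact hp
      have hplen0 : p < (pvB input o ℓ j).length := by rw [ihlen]; exact hp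
      rw [hstep, pv_getD_set _ _ _ _ hplen1, pv_getD_set _ _ _ _ hplen0, ihval p hp]
      have hhita := pv_hit_toNat hN o (j : Int) (by positivity) hjN p hpI
      have hhitb := pv_hit_toNat hN o (ℓ - 1 - (j : Int)) hb0N.1 hb0N.2 p hpI
      obtain ⟨d, hd, hd0, hdN⟩ : ∃ d : Int, ((p : Int) - o) % (input.length : Int) = d
          ∧ 0 ≤ d ∧ d < (input.length : Int) :=
        ⟨_, rfl, Int.emod_nonneg _ (by omega), Int.emod_lt_of_pos _ hN⟩
      rw [hd] at hhita hhitb ⊢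
      by_cases hcb : ((o + (ℓ - 1 - (j : Int))) % (input.length : Int)).toNat = p
      · have hdd : d = ℓ - 1 - (j : Int) := hhitb.mp hcb
        rw [if_pos hcb, hva, if_pos (by omega), hdd]
        congr 2
        have harg : o + ℓ - 1 - (ℓ - 1 - (j : Int)) = o + (j : Int) := by ring
        rw [harg]
      · rw [if_neg hcb]
        have hdb' : d ≠ ℓ - 1 - (j : Int) := fun h => hcb (hhitb.mpr h)
        by_cases hca : ((o + (j : Int)) % (input.length : Int)).toNat = p
        · have hdd : d = (j : Int) := hhita.mp hca
          rw [if_pos hca, hvb, if_pos (by omega), hdd]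
          congr 2
          have harg : o + ℓ - 1 - (j : Int) = o + (ℓ - 1 - (j : Int)) := by ring
          rw [harg]
        · have hda' : d ≠ (j : Int) := fun h => hca (hhita.mpr h)
          rw [if_neg hca]
          by_cases hc : d < (j : Int) ∨ (ℓ - (j : Int) ≤ d ∧ d < ℓ)
          · rw [if_pos hc, if_pos (by omega)]
          · rw [if_neg hc, if_neg (by omega)]

-- the per-step equality: A's copy-and-rewrite equals B's in-place two-pointer reversal
theorem pv_step_eq (input : List Int) (o ℓ : Int) (hℓN : ℓ ≤ (input.length : Int)) :
    knot_hash input o ℓ = reverse_segment input o ℓ := by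
  by_cases hℓ0 : ℓ ≤ 0
  · unfold knot_hash reverse_segment
    rw [PySem.List.pyRange_one_eq_nil hℓ0,
      PySem.List.pyRange_one_eq_nil (by
        rw [PySem.Int.floordiv_eq_ediv_of_pos (by norm_num)]
        omega)]
    rfl
  · rw [not_le] at hℓ0
    have hN : 0 < (input.length : Int) := by omega
    rw [knot_hash_eq_pvA, reverse_segment_eq_pvB,
      PySem.Int.floordiv_eq_ediv_of_pos (by norm_num)]
    obtain ⟨hlenA, hvalA⟩ := pvA_char input o ℓ hN hℓN ℓ.toNat (by omega)
    obtain ⟨hlenB, hvalB⟩ := pvB_char input o ℓ hN hℓ0 hℓN (ℓ / 2).toNat (by omega)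
    apply List.ext_getElem (by rw [hlenA, hlenB])
    intro p h1 h2
    have hp : p < input.length := by rw [hlenA] at h1; exact h1
    have hpI : (p : Int) < (input.length : Int) := by exact_mod_cast hp
    rw [← List.getD_eq_getElem _ 0 h1, ← List.getD_eq_getElem _ 0 h2,
      hvalA p hp, hvalB p hp]
    have hback := pv_hit_iff hN o (((p : Int) - o) % (input.length : Int))
      (Int.emod_nonneg _ (by omega)) (Int.emod_lt_of_pos _ hN) (p : Int) (by positivity) hpI
    obtain ⟨d, hd, hd0, hdN⟩ : ∃ d : Int, ((p : Int) - o) % (input.length : Int) = d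
        ∧ 0 ≤ d ∧ d < (input.length : Int) :=
      ⟨_, rfl, Int.emod_nonneg _ (by omega), Int.emod_lt_of_pos _ hN⟩
    rw [hd] at hback ⊢
    by_cases hcB : d < (((ℓ / 2).toNat : Int)) ∨ (ℓ - (((ℓ / 2).toNat : Int)) ≤ d ∧ d < ℓ)
    · rw [if_pos (by omega), if_pos hcB]
    · by_cases hcA : d < ℓ
      · -- middle element of an odd-length segment: it maps to itself
        rw [if_pos (by omega), if_neg hcB]
        have hmid : o + ℓ - 1 - d = o + d := by omega
        rw [hmid, hback.mpr (hd ▸ rfl), Int.toNat_natCast]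
      · rw [if_neg (by omega), if_neg hcB]

theorem pv_knot_hash_length (input : List Int) (o ℓ : Int) :
    (knot_hash input o ℓ).length = input.length := by
  unfold knot_hash
  exact pv_foldl_set_length _ (fun a b => List.length_set ..) _ _

-- A's inner-loop step and B's flattened step, named for the fold lemmas
def pvFA : (List Int × Int × Int) → Int → (List Int × Int × Int) :=
  fun st length => (knot_hash st.1 st.2.1 length, st.2.1 + length + st.2.2, st.2.2 + 1)

def pvFB : (List Int × Int) → (Int × Int) → (List Int × Int) :=
  fun st kl => (reverse_segment st.1 st.2 kl.2, st.2 + kl.2 + kl.1)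

theorem pvFA_app (arr : List Int) (pos ss l : Int) :
    pvFA (arr, pos, ss) l = (knot_hash arr pos l, pos + l + ss, ss + 1) := rfl

theorem pvFB_app (arr : List Int) (pos k l : Int) :
    pvFB (arr, pos) (k, l) = (reverse_segment arr pos l, pos + l + k) := rfl

-- one round: fold of A's step over the lengths = fold of B's step over their enumeration
theorem pv_round (N : Nat) (ls : List Int) (hls : ∀ l ∈ ls, l ≤ (N : Int)) :
    ∀ (s : Int) (arr : List Int) (pos : Int), arr.length = N →
      (PySem.List.enumerate ls s).foldl pvFB (arr, pos)
          = ((ls.foldl pvFA (arr, pos, s)).1, (ls.foldl pvFA (arr, pos, s)).2.1)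
        ∧ (ls.foldl pvFA (arr, pos, s)).1.length = N
        ∧ (ls.foldl pvFA (arr, pos, s)).2.2 = s + ls.length := by
  induction ls with
  | nil =>
    intro s arr pos hlen
    simp [PySem.List.enumerate_nil, hlen]
  | cons l ls ih =>
    intro s arr pos hlen
    have hl : l ≤ (N : Int) := hls l (by simp)
    have hstep : reverse_segment arr pos l = knot_hash arr pos l :=
      (pv_step_eq arr pos l (by rw [hlen]; exact hl)).symm
    have hlen' : (knot_hash arr pos l).length = N := by rw [pv_knot_hash_length, hlen]
    have ihh := ih (fun x hx => hls x (by simp [hx])) (s + 1) (knot_hash arr pos l) (pos + l + s) hlen'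
    rw [PySem.List.enumerate_cons, List.foldl_cons, List.foldl_cons, pvFA_app, pvFB_app, hstep]
    refine ⟨ihh.1, ihh.2.1, ?_⟩
    rw [ihh.2.2, List.length_cons]
    push_cast
    ring

theorem pv_foldl_const {α β : Type} (g : α → α) (xs : List β) (init : α) :
    xs.foldl (fun st _ => g st) init = g^[xs.length] init := by
  induction xs generalizing init with
  | nil => rfl
  | cons x xs ih => rw [List.foldl_cons, ih, List.length_cons, Function.iterate_succ_apply]

-- T rounds: B's single flattened enumerate pass = T iterations of A's inner fold
theorem pv_outer (N : Nat) (ls : List Int) (hls : ∀ l ∈ ls, l ≤ (N : Int)) :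
    ∀ (T : Nat) (s : Int) (arr : List Int) (pos : Int), arr.length = N →
      (PySem.List.enumerate ((List.replicate T ls).flatten) s).foldl pvFB (arr, pos)
        = (((fun st => ls.foldl pvFA st)^[T] (arr, pos, s)).1,
           ((fun st => ls.foldl pvFA st)^[T] (arr, pos, s)).2.1) := by
  intro T
  induction T with
  | zero =>
    intro s arr pos hlen
    simp [PySem.List.enumerate_nil]
  | succ T ih =>
    intro s arr pos hlen
    rw [List.replicate_succ, List.flatten_cons, PySem.List.enumerate_append, List.foldl_append]
    obtain ⟨h1, h2, h3⟩ := pv_round N ls hls s arr pos hlen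
    rw [h1, Function.iterate_succ_apply]
    have hst : ls.foldl pvFA (arr, pos, s)
        = ((ls.foldl pvFA (arr, pos, s)).1, (ls.foldl pvFA (arr, pos, s)).2.1,
           s + (ls.length : Int)) := by
      rw [← h3]
    conv_rhs => rw [hst]

    exact ih (s + (ls.length : Int)) _ _ h2

-- ===== VERDICT (by name: the statement is the Claim_ definition above) =====
theorem knot_hash_n_times_spec : Claim_equal_knot_hash_n_times := by
  intro input lengths times _hdom hpre
  unfold Spec_knot_hash_n_times knot_hash_n_times knot_hash_n_times_alt
  by_cases ht : times ≤ 0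
  · have h1 : (max times 0).toNat = 0 := by omega
    rw [h1, PySem.List.pyRange_one_eq_nil ht]
    simp [PySem.List.enumerate_nil]
  · rw [not_le] at ht
    have hls : ∀ l ∈ lengths, l ≤ (input.length : Int) := by
      rcases hpre with h | h
      · omega
      · exact h
    have h1 : (max times 0).toNat = times.toNat := by omega
    rw [h1]
    have hout := pv_outer input.length lengths hls times.toNat 0 input 0 rfl
    rw [pv_foldl_pyRange01]
    show ((List.range times.toNat).foldl
        (fun (st : List Int × Int × Int) (_ : Nat) => lengths.foldl pvFA st) (input, 0, 0)).1
      = ((PySem.List.enumerate ((List.replicate times.toNat lengths).flatten) 0).foldl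
          pvFB (input, 0)).1
    rw [pv_foldl_const (fun st => lengths.foldl pvFA st), List.length_range, hout]
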